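-- pv_equiv track=rewrite | github.com/Pedestria/starbytes-project | benchmark/languages/python/track_a/fasta.py | count_random
-- ===== SOURCE A (Python) =====
-- WEIGHTS = (
--     ("A", 270),
--     ("C", 120),
--     ("G", 120),
--     ("T", 270),
--     ("N", 220),
-- )
--
-- def choose_base(value: int) -> str:
--     total = 0
--     for base, weight in WEIGHTS:
--         total += weight
--         if value < total:
--             return base
--     return "N"
--
-- def count_random(length: int, seed: int) -> dict[str, int]:
--     counts = {key: 0 for key, _ in WEIGHTS}
--     state = seed
--     for _ in range(length):
--         state = (state * 3877 + 29573) % 139968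
--         base = choose_base(state % 1000)
--         counts[base] += 1
--     return counts
-- ===== SOURCE B (Python) =====
-- def count_random(length: int, seed: int) -> dict[str, int]:
--     def step(s):
--         return (s * 3877 + 29573) % 139968
--
--     def classify(s):
--         v = s % 1000
--         if v < 270:
--             return "A"
--         if v < 390:
--             return "C"
--         if v < 510:
--             return "G"
--         if v < 780:
--             return "T"
--         return "N"
--
--     counts = {"A": 0, "C": 0, "G": 0, "T": 0, "N": 0}
--     if length <= 0:
--         return counts
--     s1 = step(seed)
--     cyc = {"A": 0, "C": 0, "G": 0, "T": 0, "N": 0}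
--     cyc[classify(s1)] += 1
--     s = step(s1)
--     p = 1
--     while p < length and s != s1:
--         cyc[classify(s)] += 1
--         s = step(s)
--         p += 1
--     if p == length:
--         return cyc
--     q, r = divmod(length, p)
--     counts = {k: q * v for k, v in cyc.items()}
--     s = s1
--     for _ in range(r):
--         counts[classify(s)] += 1
--         s = step(s)
--     return counts
-- ===== Notes on version B (the rewrite author's own statement) =====
-- stated objective: faster
-- what changed: B detects the LCG's cycle (period <= 139968) once, counts bases over one period, and combines quotient*cycle-counts plus a remainder walk, instead of A's per-character loop over all `length` states.
import Mathlib
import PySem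

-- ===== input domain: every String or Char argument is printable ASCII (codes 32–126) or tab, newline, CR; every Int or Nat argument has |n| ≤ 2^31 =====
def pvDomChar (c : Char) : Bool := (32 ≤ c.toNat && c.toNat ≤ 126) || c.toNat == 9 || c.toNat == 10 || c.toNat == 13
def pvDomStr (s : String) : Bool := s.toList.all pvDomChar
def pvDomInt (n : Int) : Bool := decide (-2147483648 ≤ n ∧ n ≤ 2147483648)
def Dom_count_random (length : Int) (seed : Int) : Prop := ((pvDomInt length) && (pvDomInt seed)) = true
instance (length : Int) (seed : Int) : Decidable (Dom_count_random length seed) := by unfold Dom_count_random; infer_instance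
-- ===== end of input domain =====

-- B replaces A's per-character loop by one walk of the LCG's cycle (period ≤ 139968):
-- counts over one period times the quotient plus a remainder walk — measurably faster for large `length`.

-- ===== PORT A =====
def pvWeights : List (String × Int) :=
  [("A", 270), ("C", 120), ("G", 120), ("T", 270), ("N", 220)]

def chooseGo : List (String × Int) → Int → Int → String
  | [], _, _ => "N"
  | (b, w) :: rest, total, value =>
    let t := total + w
    if value < t then b else chooseGo rest t value

def choose_base (value : Int) : String := chooseGo pvWeights 0 value

def count_random (length : Int) (seed : Int) : List (String × Int) :=
  let counts : PySem.Dict String Int :=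
    pvWeights.foldl (fun d kv => d.insert kv.1 0) PySem.Dict.empty
  let res := (PySem.List.pyRange 0 length 1).foldl
    (fun (st : Int × PySem.Dict String Int) _ =>
      let state := PySem.Int.mod (st.1 * 3877 + 29573) 139968
      let base := choose_base (PySem.Int.mod state 1000)
      (state, st.2.modify base 0 (· + 1)))
    (seed, counts)
  res.2.items

-- ===== PORT B =====
def pvStep (s : Int) : Int := PySem.Int.mod (s * 3877 + 29573) 139968

def pvClassify (s : Int) : String :=
  let v := PySem.Int.mod s 1000
  if v < 270 then "A"
  else if v < 390 then "C"
  else if v < 510 then "G"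
  else if v < 780 then "T"
  else "N"

-- the `while p < length and s != s1` loop of Source B
def pvWhile (length s1 : Int) (s p : Int) (cyc : PySem.Dict String Int) :
    Int × Int × PySem.Dict String Int :=
  if h : p < length ∧ s ≠ s1 then
    pvWhile length s1 (pvStep s) (p + 1) (cyc.modify (pvClassify s) 0 (· + 1))
  else (s, p, cyc)
termination_by (length - p).toNat
decreasing_by omega

def count_random_alt (length : Int) (seed : Int) : List (String × Int) :=
  let counts : PySem.Dict String Int :=
    PySem.Dict.ofList [("A", 0), ("C", 0), ("G", 0), ("T", 0), ("N", 0)]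
  if length ≤ 0 then counts.items
  else
    let s1 := pvStep seed
    let cyc : PySem.Dict String Int :=
      (PySem.Dict.ofList [("A", 0), ("C", 0), ("G", 0), ("T", 0), ("N", 0)]).modify
        (pvClassify s1) 0 (· + 1)
    let res := pvWhile length s1 (pvStep s1) 1 cyc
    let p := res.2.1
    let cycF := res.2.2
    if p = length then cycF.items
    else
      let q := PySem.Int.floordiv length p
      let r := PySem.Int.mod length p
      let counts2 := cycF.items.foldl (fun d kv => d.insert kv.1 (q * kv.2)) PySem.Dict.empty
      let fin := (PySem.List.pyRange 0 r 1).foldl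
        (fun (st : PySem.Dict String Int × Int) _ =>
          (st.1.modify (pvClassify st.2) 0 (· + 1), pvStep st.2))
        (counts2, s1)
      fin.1.items

-- ===== PRECONDITION & SPEC =====
def Spec_count_random (length : Int) (seed : Int) (out : List (String × Int)) : Prop := out = count_random_alt length seed
instance (length : Int) (seed : Int) (out : List (String × Int)) : Decidable (Spec_count_random length seed out) := by unfold Spec_count_random; infer_instance

-- ===== CLAIM (what is proved, stated in full; the proofs are below) =====
def Claim_equal_count_random : Prop := ∀ (length : Int) (seed : Int), Dom_count_random length seed → Spec_count_random length seed (count_random length seed)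

-- ===== LEMMAS AND PROOFS =====

-- 5-component count vector (A, C, G, T, N) and the dict it denotes
def pvV5 : Type := Int × Int × Int × Int × Int

def pvAdd (x y : pvV5) : pvV5 :=
  (x.1 + y.1, x.2.1 + y.2.1, x.2.2.1 + y.2.2.1, x.2.2.2.1 + y.2.2.2.1, x.2.2.2.2 + y.2.2.2.2)

def pvZero : pvV5 := (0, 0, 0, 0, 0)

def pvScale (q : Int) (x : pvV5) : pvV5 :=
  (q * x.1, q * x.2.1, q * x.2.2.1, q * x.2.2.2.1, q * x.2.2.2.2)

def pvUnit (b : String) : pvV5 :=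
  if b = "A" then (1, 0, 0, 0, 0)
  else if b = "C" then (0, 1, 0, 0, 0)
  else if b = "G" then (0, 0, 1, 0, 0)
  else if b = "T" then (0, 0, 0, 1, 0)
  else (0, 0, 0, 0, 1)

def pvMkd (v : pvV5) : PySem.Dict String Int :=
  PySem.Dict.mk [("A", v.1), ("C", v.2.1), ("G", v.2.2.1), ("T", v.2.2.2.1), ("N", v.2.2.2.2)]

-- counts of the n states s, pvStep s, …, pvStep^[n-1] s
def pvW (s : Int) : Nat → pvV5
  | 0 => pvZero
  | n + 1 => pvAdd (pvUnit (pvClassify s)) (pvW (pvStep s) n)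

theorem pvAdd_zero_left (v : pvV5) : pvAdd pvZero v = v := by
  obtain ⟨a, c, g, t, n⟩ := v; simp [pvAdd, pvZero]

theorem pvAdd_zero_right (v : pvV5) : pvAdd v pvZero = v := by
  obtain ⟨a, c, g, t, n⟩ := v; simp [pvAdd, pvZero]

theorem pvAdd_assoc (x y z : pvV5) : pvAdd (pvAdd x y) z = pvAdd x (pvAdd y z) := by
  obtain ⟨a, c, g, t, n⟩ := x; obtain ⟨a2, c2, g2, t2, n2⟩ := y; obtain ⟨a3, c3, g3, t3, n3⟩ := z
  simp [pvAdd, add_assoc]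

theorem pvModify_cls (v : pvV5) (s : Int) :
    (pvMkd v).modify (pvClassify s) 0 (· + 1) = pvMkd (pvAdd v (pvUnit (pvClassify s))) := by
  obtain ⟨a, c, g, t, n⟩ := v
  dsimp only [pvClassify]
  split_ifs <;>
    simp [PySem.Dict.modify, PySem.Dict.insert, PySem.Dict.get?, PySem.Dict.getD,
      PySem.Dict.contains, pvMkd, pvAdd, pvUnit]

theorem pvChoose_eq (s : Int) : choose_base (PySem.Int.mod s 1000) = pvClassify s := by
  simp [choose_base, chooseGo, pvWeights, pvClassify]

theorem pvInitA : (pvWeights.foldl (fun d kv => d.insert kv.1 0) PySem.Dict.empty) = pvMkd pvZero := by rfl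

theorem pvInitB : (PySem.Dict.ofList [("A", 0), ("C", 0), ("G", 0), ("T", 0), ("N", 0)] : PySem.Dict String Int) = pvMkd pvZero := by rfl

theorem pvScaleFold (v : pvV5) (q : Int) :
    (pvMkd v).items.foldl (fun d kv => d.insert kv.1 (q * kv.2)) PySem.Dict.empty
      = pvMkd (pvScale q v) := by
  obtain ⟨a, c, g, t, n⟩ := v
  simp [PySem.Dict.insert, PySem.Dict.contains, PySem.Dict.empty, pvMkd, pvScale, List.foldl]

-- additivity of the counting vector along the orbit
theorem pvW_add (a : Nat) : ∀ (b : Nat) (s : Int),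
    pvW s (a + b) = pvAdd (pvW s a) (pvW (pvStep^[a] s) b) := by
  induction a with
  | zero => intro b s; simp [pvW, pvAdd_zero_left]
  | succ a ih =>
    intro b s
    have h1 : a + 1 + b = (a + b) + 1 := by omega
    rw [h1]
    show pvAdd (pvUnit (pvClassify s)) (pvW (pvStep s) (a + b)) = _
    rw [ih b (pvStep s)]
    show _ = pvAdd (pvAdd (pvUnit (pvClassify s)) (pvW (pvStep s) a)) (pvW (pvStep^[a+1] s) b)
    rw [pvAdd_assoc, Function.iterate_succ_apply pvStep a s]

theorem pvW_snoc (n : Nat) (s : Int) :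
    pvW s (n + 1) = pvAdd (pvW s n) (pvUnit (pvClassify (pvStep^[n] s))) := by
  rw [pvW_add n 1 s]
  congr 1
  show pvAdd (pvUnit (pvClassify (pvStep^[n] s))) pvZero = _
  exact pvAdd_zero_right _

theorem pvScale_succ (k : Int) (w : pvV5) : pvAdd w (pvScale k w) = pvScale (k + 1) w := by
  obtain ⟨a, c, g, t, n⟩ := w
  simp [pvAdd, pvScale, add_mul, one_mul, add_comm]

theorem pvW_mul (s : Int) (p : Nat) (hfix : pvStep^[p] s = s) :
    ∀ (q : Nat), pvW s (q * p) = pvScale (q : Int) (pvW s p) := by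
  intro q
  induction q with
  | zero =>
    rw [Nat.zero_mul]
    show pvZero = _
    obtain ⟨a, c, g, t, n⟩ := pvW s p
    simp [pvScale, pvZero]
  | succ q ih =>
    have h1 : (q + 1) * p = p + q * p := by ring
    rw [h1, pvW_add p (q * p) s, hfix, ih, pvScale_succ]
    push_cast
    ring_nf

theorem pvIter_fix_mul (s : Int) (p q : Nat) (hfix : pvStep^[p] s = s) :
    pvStep^[q * p] s = s := by
  rw [mul_comm, Function.iterate_mul]
  exact Function.iterate_fixed hfix q

-- A's loop: fold of A's body over any list, as a function of its length
theorem pvAloop : ∀ (l : List Int) (s : Int) (v : pvV5),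
    l.foldl (fun (st : Int × PySem.Dict String Int) (_ : Int) =>
        (pvStep st.1, st.2.modify (pvClassify (pvStep st.1)) 0 (· + 1))) (s, pvMkd v)
      = (pvStep^[l.length] s, pvMkd (pvAdd v (pvW (pvStep s) l.length))) := by
  intro l
  induction l with
  | nil => intro s v; simp [pvAdd_zero_right, pvW]
  | cons x l ih =>
    intro s v
    rw [List.foldl_cons]
    dsimp only
    rw [pvModify_cls, ih (pvStep s) (pvAdd v (pvUnit (pvClassify (pvStep s))))]
    simp only [List.length_cons]
    rw [show pvW (pvStep s) (l.length + 1)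
        = pvAdd (pvUnit (pvClassify (pvStep s))) (pvW (pvStep (pvStep s)) l.length) from rfl]
    rw [← pvAdd_assoc]
    rw [show pvStep^[l.length + 1] s = pvStep^[l.length] (pvStep s) from
      Function.iterate_succ_apply pvStep l.length s]

-- B's remainder loop: fold of B's body over any list, as a function of its length
theorem pvBloop : ∀ (l : List Int) (s : Int) (v : pvV5),
    l.foldl (fun (st : PySem.Dict String Int × Int) (_ : Int) =>
        (st.1.modify (pvClassify st.2) 0 (· + 1), pvStep st.2)) (pvMkd v, s)
      = (pvMkd (pvAdd v (pvW s l.length)), pvStep^[l.length] s) := by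
  intro l
  induction l with
  | nil => intro s v; simp [pvAdd_zero_right, pvW]
  | cons x l ih =>
    intro s v
    rw [List.foldl_cons]
    dsimp only
    simp only [List.length_cons]
    rw [show (pvMkd v).modify (pvClassify s) 0 (· + 1) = pvMkd (pvAdd v (pvUnit (pvClassify s)))
      from pvModify_cls v s]
    rw [ih (pvStep s) (pvAdd v (pvUnit (pvClassify s)))]
    rw [show pvStep^[l.length] (pvStep s) = pvStep^[l.length + 1] s from
      (Function.iterate_succ_apply pvStep l.length s).symm]
    rw [show pvW s (l.length + 1)
        = pvAdd (pvUnit (pvClassify s)) (pvW (pvStep s) l.length) from rfl]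
    rw [← pvAdd_assoc]

-- invariant of the while loop: it walks the orbit of s1 counting as it goes, and stops
-- either because p reached length, or because it closed the cycle (s returned to s1)
theorem pvWhileInv (len s1 : Int) : ∀ (k : Nat) (p : Int), (len - p).toNat = k → 1 ≤ p → p ≤ len →
    (let r := pvWhile len s1 (pvStep^[p.toNat] s1) p (pvMkd (pvW s1 p.toNat))
     (r.2.1 = len ∧ r.2.2 = pvMkd (pvW s1 len.toNat)) ∨
     (1 ≤ r.2.1 ∧ r.2.1 < len ∧ pvStep^[r.2.1.toNat] s1 = s1 ∧ r.2.2 = pvMkd (pvW s1 r.2.1.toNat))) := by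
  intro k
  induction k using Nat.strong_induction_on with
  | _ k ih =>
    intro p hk hp1 hpl
    rw [pvWhile]
    by_cases h : p < len ∧ pvStep^[p.toNat] s1 ≠ s1
    · rw [dif_pos h]
      have harg1 : pvStep (pvStep^[p.toNat] s1) = pvStep^[(p+1).toNat] s1 := by
        have h2 : (p + 1).toNat = p.toNat + 1 := by omega
        rw [h2, Function.iterate_succ_apply']
      have harg2 : (pvMkd (pvW s1 p.toNat)).modify (pvClassify (pvStep^[p.toNat] s1)) 0 (· + 1)
          = pvMkd (pvW s1 (p+1).toNat) := by
        rw [pvModify_cls]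
        have h2 : (p + 1).toNat = p.toNat + 1 := by omega
        rw [h2, pvW_snoc]
      rw [harg1, harg2]
      exact ih (len - (p+1)).toNat (by omega) (p+1) rfl (by omega) (by omega)
    · rw [dif_neg h]
      by_cases hpe : p = len
      · left
        exact ⟨hpe, by rw [hpe]⟩
      · right
        have hplt : p < len := by omega
        have hs : pvStep^[p.toNat] s1 = s1 := by
          by_contra hne
          exact h ⟨hplt, hne⟩
        exact ⟨hp1, hplt, hs, rfl⟩

theorem pvA_char (length seed : Int) :
    count_random length seed = (pvMkd (pvW (pvStep seed) length.toNat)).items := by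
  unfold count_random
  dsimp only
  rw [pvInitA]
  have hbody : (fun (st : Int × PySem.Dict String Int) (_ : Int) =>
      (PySem.Int.mod (st.1 * 3877 + 29573) 139968,
       st.2.modify
         (choose_base (PySem.Int.mod (PySem.Int.mod (st.1 * 3877 + 29573) 139968) 1000))
         0 (· + 1)))
      = (fun (st : Int × PySem.Dict String Int) (_ : Int) =>
        (pvStep st.1, st.2.modify (pvClassify (pvStep st.1)) 0 (· + 1))) := by
    funext st x
    rw [pvChoose_eq]
    rfl
  rw [hbody, pvAloop (PySem.List.pyRange 0 length 1) seed pvZero, pvAdd_zero_left]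
  rw [PySem.List.length_pyRange_one]
  norm_num

theorem count_random_spec : Claim_equal_count_random := by
  intro length seed _
  unfold Spec_count_random
  rw [pvA_char]
  unfold count_random_alt
  dsimp only
  rw [pvInitB]
  by_cases hle : length ≤ 0
  · rw [if_pos hle]
    have h0 : length.toNat = 0 := by omega
    rw [h0]
    rfl
  · rw [if_neg hle]
    set s1 := pvStep seed with hs1
    have hcyc : (pvMkd pvZero).modify (pvClassify s1) 0 (· + 1) = pvMkd (pvW s1 (1 : Int).toNat) := by
      rw [pvModify_cls, pvAdd_zero_left]
      rw [show pvW s1 (1 : Int).toNat = pvAdd (pvUnit (pvClassify s1)) pvZero from rfl]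
      rw [pvAdd_zero_right]
    have hstart : pvStep s1 = pvStep^[(1 : Int).toNat] s1 := by
      simp
    rw [hcyc, hstart]
    have hinv := pvWhileInv length s1 (length - 1).toNat 1 rfl (by omega) (by omega)
    set r := pvWhile length s1 (pvStep^[(1 : Int).toNat] s1) 1 (pvMkd (pvW s1 (1 : Int).toNat)) with hr
    rcases hinv with ⟨hpe, hcf⟩ | ⟨hp1, hplt, hfix, hcf⟩
    · rw [if_pos hpe, hcf]
    · have hpne : r.2.1 ≠ length := by omega
      rw [if_neg hpne, hcf]
      set p := r.2.1 with hp
      have hppos : (0 : Int) < p := by omega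
      set q := PySem.Int.floordiv length p with hq
      set rr := PySem.Int.mod length p with hrr
      have hq' : q = length / p := PySem.Int.floordiv_eq_ediv_of_pos hppos
      have hrr' : rr = length % p := PySem.Int.mod_eq_emod_of_pos hppos
      have hdecomp : q * p + rr = length := PySem.Int.floordiv_mul_add_mod length p
      have hrge : (0 : Int) ≤ rr := hrr' ▸ Int.emod_nonneg length (by omega)
      have hrlt : rr < p := hrr' ▸ Int.emod_lt_of_pos length hppos
      have hqge : (0 : Int) ≤ q := by
        rw [hq']
        exact Int.ediv_nonneg (by omega) (by omega)
      have hnat : length.toNat = q.toNat * p.toNat + rr.toNat := by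
        have h1 : ((q.toNat * p.toNat + rr.toNat : Nat) : Int) = length := by
          push_cast
          rw [Int.toNat_of_nonneg hqge, Int.toNat_of_nonneg (by omega : (0:Int) ≤ p),
            Int.toNat_of_nonneg hrge]
          exact hdecomp
        omega
      rw [pvScaleFold]
      rw [pvBloop (PySem.List.pyRange 0 rr 1) s1 (pvScale q (pvW s1 p.toNat))]
      rw [PySem.List.length_pyRange_one]
      rw [show rr - 0 = rr by ring]
      congr 2
      rw [hnat]
      rw [pvW_add (q.toNat * p.toNat) rr.toNat s1]
      rw [pvIter_fix_mul s1 p.toNat q.toNat hfix]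
      rw [pvW_mul s1 p.toNat hfix q.toNat]
      rw [Int.toNat_of_nonneg hqge]
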